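-- pv_equiv track=rewrite | github.com/jovis-gnn/jovis-model | models/sasrec/string_matcher/prod_name_utils.py | find_latest_entity
-- ===== SOURCE A (Python) =====
-- def find_latest_entity(label2starts: dict[str, set[int]]) -> str:
--     """Finds the matched entity appearing latest in the text."""
--     curr_max = -1
--     latest_label = ""
--     for label, starts in label2starts.items():
--         for start in starts:
--             if start > curr_max:
--                 latest_label = label
--                 curr_max = start
--
--     return latest_label, curr_max
-- ===== SOURCE B (Python) =====
-- def find_latest_entity(label2starts):
--     """Finds the matched entity appearing latest in the text."""
--     best = max((s for starts in label2starts.values() for s in starts), default=-1)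
--     if best <= -1:
--         return "", -1
--     for label, starts in label2starts.items():
--         if best in starts:
--             return label, best
-- ===== Notes on version B (the rewrite author's own statement) =====
-- stated objective: alternative
-- what changed: Replaced A's single fused scan that tracks the running maximum together with its label by a two-pass aggregate-then-locate shape: first compute the global maximum start, then return the first label whose start set contains it.
import Mathlib
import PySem

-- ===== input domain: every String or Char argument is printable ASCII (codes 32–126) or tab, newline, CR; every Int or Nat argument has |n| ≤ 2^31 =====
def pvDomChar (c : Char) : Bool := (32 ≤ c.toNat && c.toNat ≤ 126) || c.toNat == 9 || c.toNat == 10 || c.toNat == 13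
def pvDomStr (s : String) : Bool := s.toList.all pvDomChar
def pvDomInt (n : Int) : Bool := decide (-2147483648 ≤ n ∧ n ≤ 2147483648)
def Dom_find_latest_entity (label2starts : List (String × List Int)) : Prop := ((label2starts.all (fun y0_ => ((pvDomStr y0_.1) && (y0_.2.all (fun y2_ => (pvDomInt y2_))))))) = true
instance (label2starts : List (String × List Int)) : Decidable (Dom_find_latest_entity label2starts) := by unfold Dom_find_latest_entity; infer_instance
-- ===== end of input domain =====

-- B replaces A's fused scan (running max tracked together with its label) by a two-pass
-- aggregate-then-locate shape: global max first, then first label containing it (objective: alternative).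


-- ===== PORT A =====
-- state is (latest_label, curr_max); inner loop over starts, outer over the dict items
def find_latest_entity (label2starts : List (String × List Int)) : String × Int :=
  label2starts.foldl
    (fun acc p => p.2.foldl (fun a start => if start > a.2 then (p.1, start) else a) acc)
    ("", -1)

-- ===== PORT B =====
-- first label whose start set contains `best`; the fall-off-the-end case is unreachable in Source B
-- when best > -1 (Python returns None only on that unreachable path), ported as ("", -1)
def pvAltLocate (best : Int) : List (String × List Int) → String × Int
  | [] => ("", -1)
  | p :: rest => if best ∈ p.2 then (p.1, best) else pvAltLocate best rest

def find_latest_entity_alt (label2starts : List (String × List Int)) : String × Int :=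
  let best := (PySem.List.max? ((label2starts.map Prod.snd).flatten) (fun x => x)).getD (-1)
  if best ≤ -1 then ("", -1) else pvAltLocate best label2starts

-- ===== PRECONDITION & SPEC =====
def Spec_find_latest_entity (label2starts : List (String × List Int)) (out : String × Int) : Prop := out = find_latest_entity_alt label2starts
instance (label2starts : List (String × List Int)) (out : String × Int) : Decidable (Spec_find_latest_entity label2starts out) := by unfold Spec_find_latest_entity; infer_instance

-- ===== CLAIM (what is proved, stated in full; the proofs are below) =====
def Claim_equal_find_latest_entity : Prop := ∀ (label2starts : List (String × List Int)), Dom_find_latest_entity label2starts → Spec_find_latest_entity label2starts (find_latest_entity label2starts)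

-- ===== LEMMAS AND PROOFS =====

lemma pv_le_foldl_max (l : List Int) (a : Int) : a ≤ l.foldl max a := by
  induction l generalizing a with
  | nil => simp
  | cons h t ih => exact le_trans (le_max_left a h) (ih (max a h))

lemma pv_foldl_max_mem (l : List Int) (a : Int) :
    l.foldl max a = a ∨ l.foldl max a ∈ l := by
  induction l generalizing a with
  | nil => simp
  | cons h t ih =>
    have step : List.foldl max a (h :: t) = List.foldl max (max a h) t := rfl
    rcases ih (max a h) with hc | hc
    · rcases max_cases a h with ⟨he, _⟩ | ⟨he, _⟩
      · left; rw [step, hc, he]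
      · right; rw [step, hc, he]; exact List.mem_cons_self
    · right; rw [step]; exact List.mem_cons_of_mem _ hc

lemma pv_mem_le_foldl_max (l : List Int) (a x : Int) (hx : x ∈ l) : x ≤ l.foldl max a := by
  induction l generalizing a with
  | nil => simp at hx
  | cons h t ih =>
    rcases List.mem_cons.mp hx with rfl | hx
    · exact le_trans (le_max_right a x) (pv_le_foldl_max t _)
    · exact ih _ hx

lemma pv_foldl_max_max (l : List Int) (a b : Int) :
    l.foldl max (max a b) = max a (l.foldl max b) := by
  induction l generalizing b with
  | nil => simp
  | cons h t ih => simp only [List.foldl_cons]; rw [max_assoc, ih]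

-- A's inner loop: either no start beats a.2 (no change), or result is (p.1, running max)
lemma pv_inner (lab : String) (starts : List Int) (a : String × Int) :
    starts.foldl (fun a start => if start > a.2 then (lab, start) else a) a =
      if starts.foldl max a.2 > a.2 then (lab, starts.foldl max a.2) else a := by
  induction starts generalizing a with
  | nil => simp
  | cons h t ih =>
    simp only [List.foldl_cons]
    by_cases hh : h > a.2
    · have hma : max a.2 h = h := max_eq_right (le_of_lt hh)
      rw [if_pos hh, ih (lab, h), hma]
      dsimp only
      by_cases ht : t.foldl max h > h
      · rw [if_pos ht, if_pos (lt_trans hh ht)]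
      · have he : t.foldl max h = h := le_antisymm (not_lt.mp ht) (pv_le_foldl_max t h)
        rw [if_neg ht, he, if_pos hh]
    · have hma : max a.2 h = a.2 := max_eq_left (not_lt.mp hh)
      rw [if_neg hh, ih a, hma]

def pvMaxFold (l : List (String × List Int)) (m : Int) : Int :=
  l.foldl (fun m p => p.2.foldl max m) m

lemma pv_le_pvMaxFold (l : List (String × List Int)) (m : Int) : m ≤ pvMaxFold l m := by
  induction l generalizing m with
  | nil => simp [pvMaxFold]
  | cons p t ih => exact le_trans (pv_le_foldl_max p.2 m) (ih _)

-- MAIN: A's fold from any state equals "locate the global max iff it beats the state"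
lemma pv_main (l : List (String × List Int)) (a : String × Int) :
    l.foldl (fun acc p => p.2.foldl (fun a start => if start > a.2 then (p.1, start) else a) acc) a =
      if pvMaxFold l a.2 > a.2 then pvAltLocate (pvMaxFold l a.2) l else a := by
  induction l generalizing a with
  | nil => simp [pvMaxFold]
  | cons p t ih =>
    have hM : pvMaxFold (p :: t) a.2 = pvMaxFold t (p.2.foldl max a.2) := rfl
    have hm1le : a.2 ≤ p.2.foldl max a.2 := pv_le_foldl_max p.2 a.2
    have htle : p.2.foldl max a.2 ≤ pvMaxFold t (p.2.foldl max a.2) := pv_le_pvMaxFold t _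
    simp only [List.foldl_cons]
    rw [pv_inner]
    by_cases h1 : p.2.foldl max a.2 > a.2
    · rw [if_pos h1, ih (p.1, p.2.foldl max a.2)]
      dsimp only
      have hm1mem : p.2.foldl max a.2 ∈ p.2 := by
        rcases pv_foldl_max_mem p.2 a.2 with hc | hc
        · omega
        · exact hc
      by_cases h2 : pvMaxFold t (p.2.foldl max a.2) > p.2.foldl max a.2
      · have hnot : pvMaxFold t (p.2.foldl max a.2) ∉ p.2 := fun hmem =>
          absurd (pv_mem_le_foldl_max p.2 a.2 _ hmem) (by omega)
        rw [if_pos h2, hM, if_pos (by omega)]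
        simp [pvAltLocate, hnot]
      · have he : pvMaxFold t (p.2.foldl max a.2) = p.2.foldl max a.2 := by omega
        rw [if_neg h2, hM, if_pos (by omega), he]
        simp [pvAltLocate, hm1mem]
    · have he1 : p.2.foldl max a.2 = a.2 := by omega
      rw [if_neg h1, ih a, hM, he1]
      by_cases h2 : pvMaxFold t a.2 > a.2
      · have hnot : pvMaxFold t a.2 ∉ p.2 := fun hmem =>
          absurd (pv_mem_le_foldl_max p.2 a.2 _ hmem) (by omega)
        rw [if_pos h2, if_pos h2]
        simp [pvAltLocate, hnot]
      · rw [if_neg h2, if_neg h2]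

lemma pv_maxfold_eq_flatten (l : List (String × List Int)) (m : Int) :
    pvMaxFold l m = ((l.map Prod.snd).flatten).foldl max m := by
  induction l generalizing m with
  | nil => simp [pvMaxFold]
  | cons p t ih =>
    have h1 : pvMaxFold (p :: t) m = pvMaxFold t (p.2.foldl max m) := rfl
    have h2 : (((p :: t).map Prod.snd).flatten) = p.2 ++ ((t.map Prod.snd).flatten) := by simp
    rw [h1, ih, h2, List.foldl_append]

-- ===== VERDICT (by name: the statement is the Claim_ definition above) =====
theorem find_latest_entity_spec : Claim_equal_find_latest_entity := by
  intro l _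
  unfold Spec_find_latest_entity find_latest_entity find_latest_entity_alt
  rw [pv_main]
  have hM : pvMaxFold l (-1) = ((l.map Prod.snd).flatten).foldl max (-1) :=
    pv_maxfold_eq_flatten l (-1)
  cases hf : (l.map Prod.snd).flatten with
  | nil =>
    rw [hf] at hM
    simp [hM, PySem.List.max?]
  | cons x xs =>
    rw [hf] at hM
    have hbest : (PySem.List.max? (x :: xs) (fun x => x)).getD (-1) = xs.foldl max x := by
      rw [PySem.List.max?_id_cons]; rfl
    have hM2 : pvMaxFold l (-1) = max (-1) (xs.foldl max x) := by
      rw [hM]; simp only [List.foldl_cons]; exact pv_foldl_max_max xs (-1) x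
    show (if pvMaxFold l (-1) > -1 then pvAltLocate (pvMaxFold l (-1)) l else ("", -1)) =
      (if ((PySem.List.max? (x :: xs) (fun x => x)).getD (-1)) ≤ -1 then ("", -1)
       else pvAltLocate ((PySem.List.max? (x :: xs) (fun x => x)).getD (-1)) l)
    rw [hbest]
    by_cases hgt : xs.foldl max x > -1
    · have h1 : max (-1 : Int) (xs.foldl max x) = xs.foldl max x := max_eq_right (by omega)
      have hL : pvMaxFold l (-1) > -1 := by rw [hM2, h1]; exact hgt
      rw [if_pos hL, if_neg (show ¬ xs.foldl max x ≤ -1 by omega), hM2, h1]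
    · have h1 : max (-1 : Int) (xs.foldl max x) = -1 := max_eq_left (by omega)
      have hL : ¬ pvMaxFold l (-1) > -1 := by rw [hM2, h1]; omega
      rw [if_neg hL, if_pos (show xs.foldl max x ≤ -1 by omega)]
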